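-- pv_equiv track=rewrite | github.com/jhaip/wysiwyog | programs/pointing_at--1766.py | get_papers_corners
-- ===== SOURCE A (Python) =====
-- def get_papers_corners(paper):
--     tl = None
--     tr = None
--     br = None
--     bl = None
--     for corner in paper["corners"]:
--         if corner["CornerId"] == 0:
--             tl = corner
--         elif corner["CornerId"] == 1:
--             tr = corner
--         elif corner["CornerId"] == 2:
--             br = corner
--         elif corner["CornerId"] == 3:
--             bl = corner
--     return (tl, tr, br, bl)
-- ===== SOURCE B (Python) =====
-- def get_papers_corners(paper):
--     corners = paper["corners"]
--
--     def last_with_id(cid):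
--         # scan back-to-front and return the first match = last occurrence
--         for corner in reversed(corners):
--             if corner["CornerId"] == cid:
--                 return corner
--         return None
--
--     return (last_with_id(0), last_with_id(1), last_with_id(2), last_with_id(3))
-- ===== Notes on version B (the rewrite author's own statement) =====
-- stated objective: alternative
-- what changed: Replaces the single forward pass that maintains four scalar slots through a four-way elif with four independent back-to-front scans, each early-exiting at the first match (= last occurrence) of its CornerId.
import Mathlib
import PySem

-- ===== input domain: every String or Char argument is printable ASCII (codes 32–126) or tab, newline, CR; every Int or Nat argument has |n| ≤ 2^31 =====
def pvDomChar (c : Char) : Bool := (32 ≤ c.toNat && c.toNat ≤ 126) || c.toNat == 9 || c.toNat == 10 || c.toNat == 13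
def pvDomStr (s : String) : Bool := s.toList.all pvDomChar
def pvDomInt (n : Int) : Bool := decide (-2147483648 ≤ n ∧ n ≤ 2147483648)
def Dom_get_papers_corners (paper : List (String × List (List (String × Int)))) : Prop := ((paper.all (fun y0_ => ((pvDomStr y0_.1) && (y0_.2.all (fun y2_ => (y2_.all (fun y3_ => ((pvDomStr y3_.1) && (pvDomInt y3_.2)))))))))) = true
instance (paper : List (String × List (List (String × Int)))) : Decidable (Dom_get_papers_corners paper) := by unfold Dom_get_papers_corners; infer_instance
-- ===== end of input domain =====

-- B replaces A's single forward pass with four elif-updated slots by four independent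
-- back-to-front scans, each returning the first match (= last occurrence) of its CornerId;
-- same O(n), an alternative decomposition.


-- ===== PORT A =====
-- state is (tl, tr, br, bl); a corner without a "CornerId" key would raise KeyError in Python (excluded by Pre_)
def pvStepA (s : (Option (List (String × Int))) × (Option (List (String × Int))) × (Option (List (String × Int))) × (Option (List (String × Int))))
    (corner : List (String × Int)) :
    (Option (List (String × Int))) × (Option (List (String × Int))) × (Option (List (String × Int))) × (Option (List (String × Int))) :=
  match (PySem.Dict.mk corner).get? "CornerId" with
  | none => s
  | some cid =>
    if cid = 0 then (some corner, s.2.1, s.2.2.1, s.2.2.2)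
    else if cid = 1 then (s.1, some corner, s.2.2.1, s.2.2.2)
    else if cid = 2 then (s.1, s.2.1, some corner, s.2.2.2)
    else if cid = 3 then (s.1, s.2.1, s.2.2.1, some corner)
    else s

def get_papers_corners (paper : List (String × List (List (String × Int)))) : (Option (List (String × Int))) × (Option (List (String × Int))) × (Option (List (String × Int))) × (Option (List (String × Int))) :=
  match (PySem.Dict.mk paper).get? "corners" with
  | none => (none, none, none, none)   -- Python raises KeyError here; excluded by Pre_
  | some corners => corners.foldl pvStepA (none, none, none, none)

-- ===== PORT B =====
-- back-to-front scan, first match = last occurrence (a corner without "CornerId" raises in Python; excluded by Pre_)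
def pvLastWithId (corners : List (List (String × Int))) (cid : Int) : Option (List (String × Int)) :=
  corners.reverse.find? (fun corner => (PySem.Dict.mk corner).get? "CornerId" == some cid)

def get_papers_corners_alt (paper : List (String × List (List (String × Int)))) : (Option (List (String × Int))) × (Option (List (String × Int))) × (Option (List (String × Int))) × (Option (List (String × Int))) :=
  match (PySem.Dict.mk paper).get? "corners" with
  | none => (none, none, none, none)   -- Python raises KeyError here; excluded by Pre_
  | some corners =>
    (pvLastWithId corners 0, pvLastWithId corners 1, pvLastWithId corners 2, pvLastWithId corners 3)

-- ===== PRECONDITION & SPEC =====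
-- Exactly where both Pythons return: "corners" is a key of paper and every corner has a "CornerId" key.
def Pre_get_papers_corners (paper : List (String × List (List (String × Int)))) : Prop :=
  (PySem.Dict.mk paper).contains "corners" = true ∧
  ∀ c ∈ (PySem.Dict.mk paper).getD "corners" [], (PySem.Dict.mk c).contains "CornerId" = true
instance (paper : List (String × List (List (String × Int)))) : Decidable (Pre_get_papers_corners paper) := by unfold Pre_get_papers_corners; infer_instance

def pvWitness_get_papers_corners : (List (String × List (List (String × Int)))) :=
  [("corners", [[("CornerId", 0), ("x", 5)], [("CornerId", 2), ("x", 7)]])]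

def Spec_get_papers_corners (paper : List (String × List (List (String × Int)))) (out : (Option (List (String × Int))) × (Option (List (String × Int))) × (Option (List (String × Int))) × (Option (List (String × Int)))) : Prop := out = get_papers_corners_alt paper
instance (paper : List (String × List (List (String × Int)))) (out : (Option (List (String × Int))) × (Option (List (String × Int))) × (Option (List (String × Int))) × (Option (List (String × Int)))) : Decidable (Spec_get_papers_corners paper out) := by
  unfold Spec_get_papers_corners
  have i1 : DecidableEq (Option (List (String × Int))) := inferInstance
  have i2 := @instDecidableEqProd _ _ i1 i1
  have i3 := @instDecidableEqProd _ _ i1 i2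
  have i4 := @instDecidableEqProd _ _ i1 i3
  exact i4 out (get_papers_corners_alt paper)

-- ===== CLAIM (what is proved, stated in full; the proofs are below) =====
def Claim_equal_get_papers_corners : Prop := ∀ (paper : List (String × List (List (String × Int)))), Dom_get_papers_corners paper → Pre_get_papers_corners paper → Spec_get_papers_corners paper (get_papers_corners paper)

-- ===== LEMMAS AND PROOFS =====

-- one reverse-scan step: last occurrence in c :: t
lemma pvLast_cons (c : List (String × Int)) (t : List (List (String × Int))) (cid : Int) :
    pvLastWithId (c :: t) cid
      = (pvLastWithId t cid).or
          (if (PySem.Dict.mk c).get? "CornerId" == some cid then some c else none) := by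
  simp only [pvLastWithId, List.reverse_cons, List.find?_append, List.find?_cons, List.find?_nil]
  cases h : List.find? (fun corner => (PySem.Dict.mk corner).get? "CornerId" == some cid) t.reverse <;>
    cases hc : ((PySem.Dict.mk c).get? "CornerId" == some cid) <;> simp [h, hc, Option.or]

-- loop invariant: A's four slots are the last occurrences, falling back to the initial state
lemma pv_loop_eq (l : List (List (String × Int))) :
    ∀ s, l.foldl pvStepA s
      = ((pvLastWithId l 0).or s.1, (pvLastWithId l 1).or s.2.1,
         (pvLastWithId l 2).or s.2.2.1, (pvLastWithId l 3).or s.2.2.2) := by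
  induction l with
  | nil => intro s; simp [pvLastWithId]
  | cons c t ih =>
    intro s
    simp only [List.foldl_cons, ih (pvStepA s c), pvLast_cons]
    cases h : (PySem.Dict.mk c).get? "CornerId" with
    | none => simp [pvStepA, h]
    | some cid =>
      by_cases h0 : cid = 0
      · subst h0; simp [pvStepA, h]
      · by_cases h1 : cid = 1
        · subst h1; simp [pvStepA, h]
        · by_cases h2 : cid = 2
          · subst h2; simp [pvStepA, h]
          · by_cases h3 : cid = 3
            · subst h3; simp [pvStepA, h]
            · simp [pvStepA, h, h0, h1, h2, h3]

-- ===== VERDICT (by name: the statement is the Claim_ definition above) =====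
theorem get_papers_corners_spec : Claim_equal_get_papers_corners := by
  intro paper _ _
  unfold Spec_get_papers_corners get_papers_corners get_papers_corners_alt
  cases h : (PySem.Dict.mk paper).get? "corners" with
  | none => rfl
  | some corners => simp [pv_loop_eq corners (none, none, none, none)]
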